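-- pv_equiv track=rewrite | github.com/Jeongjjuna/programmers-BOJ | 프로그래머스/1/92334. 신고 결과 받기/신고 결과 받기.py | solution
-- ===== SOURCE A (Python) =====
-- from collections import defaultdict
--
-- def solution(id_list, report, k):
--
--     # a가 신고한 사람들 {a : set(b, c, d)}
--     log = defaultdict(set)
--
--     # a가 신고당한 횟수 {a : 2, b : 1}
--     count = defaultdict(int)
--
--
--     for r in report:
--         # a가 b를 신고했다.
--         a, b = r.split()
--
--         if b not in log[a]:
--             count[b] += 1
--             log[a].add(b)
--
--
--
--     result = []
--
--     for user_id in id_list: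
--         # user_id가 신고한 set구조
--         cnt = 0
--         for reported_id in log[user_id]:
--             if count[reported_id] >= k:
--                 cnt += 1
--         result.append(cnt)
--
--     return result
-- ===== SOURCE B (Python) =====
-- def solution(id_list, report, k):
--     # dedup reports into a flat set of (reporter, reported) pairs
--     pairs = set()
--     for r in report:
--         a, b = r.split()
--         pairs.add((a, b))
--     # distinct-report count per reported user
--     count = {}
--     for a, b in pairs:
--         count[b] = count.get(b, 0) + 1
--     banned = {b for b in count if count[b] >= k}
--     # one flat pass over the deduped pairs
--     answer = {}
--     for a, b in pairs:
--         if b in banned: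
--             answer[a] = answer.get(a, 0) + 1
--     return [answer.get(u, 0) for u in id_list]
-- ===== Notes on version B (the rewrite author's own statement) =====
-- stated objective: alternative
-- what changed: Replaces A's per-reporter dict of sets and nested id_list x set traversal with a flat deduped (reporter,reported) pair set, an explicit banned set, and a single flat accumulation pass over the pairs, reading the answer off a dict at the end.
import Mathlib
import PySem

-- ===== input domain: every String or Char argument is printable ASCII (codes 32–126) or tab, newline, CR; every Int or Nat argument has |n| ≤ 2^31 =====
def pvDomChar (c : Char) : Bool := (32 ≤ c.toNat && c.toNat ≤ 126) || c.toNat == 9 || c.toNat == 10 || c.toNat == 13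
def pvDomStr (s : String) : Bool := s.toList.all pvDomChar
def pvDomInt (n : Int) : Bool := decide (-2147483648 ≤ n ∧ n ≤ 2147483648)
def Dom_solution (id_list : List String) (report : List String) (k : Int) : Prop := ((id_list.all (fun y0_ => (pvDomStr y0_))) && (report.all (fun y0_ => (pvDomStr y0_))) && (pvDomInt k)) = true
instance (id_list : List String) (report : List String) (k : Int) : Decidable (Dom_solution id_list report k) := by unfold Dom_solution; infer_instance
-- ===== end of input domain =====

-- ===== PORT A =====
-- B changes the decomposition (flat deduped pair set + banned set + one flat pass) ; same asymptotic cost.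
-- `a, b = r.split()` is ported via pvPair; inputs where split() yields ≠ 2 words raise ValueError in A
-- and are excluded by Pre_solution. defaultdict reads that insert an empty default (log[a], log[user_id],
-- count[reported_id]) are modeled with setdefault/getD: the inserted empty defaults are never observable
-- in the returned value.
def pvPair (r : String) : String × String :=
  let parts := PySem.Str.split₀ r
  (parts.getD 0 "", parts.getD 1 "")

def pvAStep (st : PySem.Dict String (PySem.Set String) × PySem.Dict String Int) (r : String) :
    PySem.Dict String (PySem.Set String) × PySem.Dict String Int :=
  let (a, b) := pvPair r
  let log := st.1.setdefault a PySem.Set.empty          -- defaultdict: log[a] materialises the entry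
  let la := log.getD a PySem.Set.empty
  if la.contains b then (log, st.2)
  else (log.insert a (PySem.Set.add la b), st.2.insert b (st.2.getD b 0 + 1))

def solution (id_list : List String) (report : List String) (k : Int) : List Int :=
  let st := report.foldl pvAStep (PySem.Dict.empty, PySem.Dict.empty)
  id_list.foldl (fun result user_id =>
    let cnt := (st.1.getD user_id PySem.Set.empty).foldl
      (fun cnt reported_id => if st.2.getD reported_id 0 ≥ k then cnt + 1 else cnt) (0 : Int)
    result ++ [cnt]) []

-- ===== PORT B =====
def solution_alt (id_list : List String) (report : List String) (k : Int) : List Int :=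
  let pairs : PySem.Set (String × String) :=
    report.foldl (fun s r => PySem.Set.add s (pvPair r)) PySem.Set.empty
  let count : PySem.Dict String Int :=
    pairs.foldl (fun d p => d.insert p.2 (d.getD p.2 0 + 1)) PySem.Dict.empty
  let banned : PySem.Set String :=
    PySem.Set.ofList (count.keys.filter (fun b => decide (count.getD b 0 ≥ k)))
  let answer : PySem.Dict String Int :=
    pairs.foldl (fun d p =>
      if PySem.Set.contains banned p.2 then d.insert p.1 (d.getD p.1 0 + 1) else d)
      PySem.Dict.empty
  id_list.map (fun u => answer.getD u 0)

-- ===== PRECONDITION & SPEC =====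
-- Pre_ excludes exactly the inputs where `a, b = r.split()` raises ValueError (a report that is not two words).
def Pre_solution (id_list : List String) (report : List String) (k : Int) : Prop :=
  ∀ r ∈ report, (PySem.Str.split₀ r).length = 2
instance (id_list : List String) (report : List String) (k : Int) : Decidable (Pre_solution id_list report k) := by unfold Pre_solution; infer_instance
def pvWitness_solution : List String × List String × Int :=
  (["muzi", "frodo", "apeach"], ["muzi frodo", "apeach frodo", "muzi frodo"], 2)

def Spec_solution (id_list : List String) (report : List String) (k : Int) (out : List Int) : Prop := out = solution_alt id_list report k
instance (id_list : List String) (report : List String) (k : Int) (out : List Int) : Decidable (Spec_solution id_list report k out) := by unfold Spec_solution; infer_instance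

-- ===== CLAIM (what is proved, stated in full; the proofs are below) =====
def Claim_equal_solution : Prop := ∀ (id_list : List String) (report : List String) (k : Int), Dom_solution id_list report k → Pre_solution id_list report k → Spec_solution id_list report k (solution id_list report k)

-- ===== LEMMAS AND PROOFS =====

-- the invariant tying A's (log, count) state to the deduped pair list P
def pvInv (log : PySem.Dict String (PySem.Set String)) (count : PySem.Dict String Int)
    (P : List (String × String)) : Prop :=
  (∀ a, log.getD a PySem.Set.empty = (P.filter (fun p => p.1 == a)).map (·.2)) ∧
  (∀ b, count.getD b 0 = (P.countP (fun p => p.2 == b) : Int))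

lemma pvInv_empty : pvInv PySem.Dict.empty PySem.Dict.empty [] := by
  constructor <;> intro x <;> simp [PySem.Dict.getD, PySem.Dict.get?, PySem.Dict.empty]

lemma pvGetD_empty {κ ν : Type} [BEq κ] (k : κ) (d0 : ν) :
    (PySem.Dict.empty (κ := κ) (ν := ν)).getD k d0 = d0 := by
  simp [PySem.Dict.getD, PySem.Dict.get?, PySem.Dict.empty]

lemma pvGetD_setdefault_of_ne {κ ν : Type} [BEq κ] [LawfulBEq κ] (d : PySem.Dict κ ν)
    {k k' : κ} (v d0 : ν) (h : k' ≠ k) : (d.setdefault k v).getD k' d0 = d.getD k' d0 := by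
  simp [PySem.Dict.getD, PySem.Dict.get?_setdefault_of_ne d v h]

lemma pvCountFold {β : Type} (key : β → String) (l : List β) (v : String) :
    (l.foldl (fun (d : PySem.Dict String Int) x => d.insert (key x) (d.getD (key x) 0 + 1))
      PySem.Dict.empty).getD v 0 = (l.countP (fun x => key x == v) : Int) := by
  have he : l.foldl (fun (d : PySem.Dict String Int) x => d.insert (key x) (d.getD (key x) 0 + 1))
        PySem.Dict.empty
      = (l.map key).foldl (fun d x => d.insert x (d.getD x 0 + 1)) PySem.Dict.empty :=
    (List.foldl_map (f := key)
      (g := fun (d : PySem.Dict String Int) x => d.insert x (d.getD x 0 + 1))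
      (l := l) (init := PySem.Dict.empty)).symm
  rw [he, PySem.Dict.getD_foldl_insert_add_one, pvGetD_empty]
  simp [List.count_eq_countP, List.countP_map, Function.comp_def]

lemma pvMem_iff (P : List (String × String)) (a b : String) :
    b ∈ (P.filter (fun p => p.1 == a)).map (·.2) ↔ (a, b) ∈ P := by
  simp only [List.mem_map, List.mem_filter, beq_iff_eq]
  constructor
  · rintro ⟨p, ⟨hp, h1⟩, h2⟩
    rwa [show (a, b) = p from by rw [← h1, ← h2]]
  · intro h
    exact ⟨(a, b), ⟨h, rfl⟩, rfl⟩

lemma pvInv_step (log : PySem.Dict String (PySem.Set String)) (count : PySem.Dict String Int)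
    (P : List (String × String)) (r : String) (h : pvInv log count P) :
    pvInv (pvAStep (log, count) r).1 (pvAStep (log, count) r).2 (PySem.Set.add P (pvPair r)) := by
  obtain ⟨h1, h2⟩ := h
  rcases hab : pvPair r with ⟨a, b⟩
  have hla : (log.setdefault a PySem.Set.empty).getD a PySem.Set.empty
      = log.getD a PySem.Set.empty := PySem.Dict.getD_setdefault_self log a _ _
  have hmem : ((log.setdefault a PySem.Set.empty).getD a PySem.Set.empty).contains b = true
      ↔ (a, b) ∈ P := by
    rw [hla, PySem.Set.contains_iff, h1, pvMem_iff]
  simp only [pvAStep, hab]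
  by_cases hin : (a, b) ∈ P
  · rw [if_pos (hmem.mpr hin), PySem.Set.add_of_mem hin]
    refine ⟨fun a' => ?_, h2⟩
    by_cases ha : a' = a
    · subst ha; rw [hla]; exact h1 a'
    · rw [pvGetD_setdefault_of_ne log _ _ ha]; exact h1 a'
  · rw [if_neg (fun hc => hin (hmem.mp hc))]
    have hnb : b ∉ (log.setdefault a PySem.Set.empty).getD a PySem.Set.empty := by
      intro hb
      exact hin (hmem.mp ((PySem.Set.contains_iff _ _).mpr hb))
    constructor
    · intro a'
      rw [PySem.Dict.getD_insert]
      rw [PySem.Set.add_eq_ite, if_neg hnb, hla, h1 a]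
      rw [PySem.Set.add_of_not_mem hin]
      by_cases ha : a' = a
      · subst ha
        simp [List.filter_append]
      · rw [if_neg ha, pvGetD_setdefault_of_ne log _ _ ha, h1 a']
        simp [List.filter_append, Ne.symm ha]
    · intro b'
      rw [PySem.Dict.getD_insert, PySem.Set.add_of_not_mem hin, List.countP_append]
      by_cases hb : b' = b
      · subst hb
        rw [if_pos rfl, h2 b']
        simp
      · rw [if_neg hb]
        rw [h2 b']
        simp [Ne.symm hb]

lemma pvInv_fold (report : List String) (log : PySem.Dict String (PySem.Set String))
    (count : PySem.Dict String Int) (P : List (String × String)) (h : pvInv log count P) :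
    pvInv (report.foldl pvAStep (log, count)).1 (report.foldl pvAStep (log, count)).2
      (report.foldl (fun s r => PySem.Set.add s (pvPair r)) P) := by
  induction report generalizing log count P with
  | nil => exact h
  | cons r rs ih =>
      have := pvInv_step log count P r h
      simpa using ih (pvAStep (log, count) r).1 (pvAStep (log, count) r).2 _ this

theorem solution_spec : Claim_equal_solution := by
  unfold Claim_equal_solution
  intro id_list report k _ _
  unfold Spec_solution solution solution_alt
  set P : List (String × String) :=
    report.foldl (fun s r => PySem.Set.add s (pvPair r)) PySem.Set.empty with hP
  obtain ⟨h1, h2⟩ := pvInv_fold report PySem.Dict.empty PySem.Dict.empty PySem.Set.empty pvInv_empty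
  rw [← hP] at h1 h2
  -- name the three B-side dictionaries / sets
  set countB : PySem.Dict String Int :=
    P.foldl (fun d p => d.insert p.2 (d.getD p.2 0 + 1)) PySem.Dict.empty with hcB
  set banned : PySem.Set String :=
    PySem.Set.ofList (countB.keys.filter (fun b => decide (countB.getD b 0 ≥ k))) with hbn
  set answer : PySem.Dict String Int :=
    P.foldl (fun d p =>
      if PySem.Set.contains banned p.2 then d.insert p.1 (d.getD p.1 0 + 1) else d)
      PySem.Dict.empty with han
  -- countB reads off the per-victim distinct-report count
  have hcount : ∀ b, countB.getD b 0 = (P.countP (fun p => p.2 == b) : Int) := by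
    intro b
    rw [hcB]
    exact pvCountFold (·.2) P b
  -- membership in banned, for victims occurring in P
  have hbanned : ∀ p ∈ P, PySem.Set.contains banned p.2
      = decide ((P.countP (fun q => q.2 == p.2) : Int) ≥ k) := by
    intro p hp
    have hkeys : countB.keys = PySem.Set.ofList (P.map (·.2)) := by
      rw [hcB, PySem.Dict.keys_foldl_insert_key P (·.2) (fun d p => d.getD p.2 0 + 1)]
      simp [PySem.Dict.empty, PySem.Dict.keys_mk, PySem.Set.update, PySem.Set.ofList_eq_foldl]
    by_cases hge : (P.countP (fun q => q.2 == p.2) : Int) ≥ k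
    · rw [decide_eq_true hge]
      rw [hbn]
      have : p.2 ∈ countB.keys.filter (fun b => decide (countB.getD b 0 ≥ k)) := by
        rw [List.mem_filter, hkeys]
        refine ⟨(PySem.Set.mem_ofList _ _).mpr (List.mem_map_of_mem hp), ?_⟩
        rw [hcount p.2]
        exact decide_eq_true hge
      exact (PySem.Set.contains_iff _ _).mpr ((PySem.Set.mem_ofList _ _).mpr this)
    · rw [decide_eq_false hge]
      rw [hbn]
      apply Bool.eq_false_iff.mpr
      intro hc
      have := (PySem.Set.mem_ofList _ _).mp ((PySem.Set.contains_iff _ _).mp hc)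
      rw [List.mem_filter] at this
      have := of_decide_eq_true this.2
      rw [hcount p.2] at this
      exact hge this
  -- answer reads off the per-reporter count over the deduped pairs
  have hanswer : ∀ u, answer.getD u 0
      = ((P.filter (fun p => PySem.Set.contains banned p.2)).countP (fun p => p.1 == u) : Int) := by
    intro u
    rw [han, PySem.List.foldl_if_eq_foldl_filter
      (fun p : String × String => PySem.Set.contains banned p.2)
      (fun (d : PySem.Dict String Int) (p : String × String) => d.insert p.1 (d.getD p.1 0 + 1))]
    exact pvCountFold (·.1) (P.filter (fun p => PySem.Set.contains banned p.2)) u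
  -- the A-side output list is a map over id_list
  rw [PySem.List.foldl_append_singleton_eq_map
    (fun user_id => ((report.foldl pvAStep (PySem.Dict.empty, PySem.Dict.empty)).1.getD
        user_id PySem.Set.empty).foldl
      (fun cnt reported_id =>
        if (report.foldl pvAStep (PySem.Dict.empty, PySem.Dict.empty)).2.getD reported_id 0 ≥ k
        then cnt + 1 else cnt) (0 : Int)) id_list []]
  rw [List.nil_append]
  apply List.map_congr_left
  intro u _
  rw [h1 u, PySem.List.foldl_ite_add_one
    (fun x => (report.foldl pvAStep (PySem.Dict.empty, PySem.Dict.empty)).2.getD x 0 ≥ k)]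
  rw [hanswer u, zero_add, List.countP_map, List.countP_filter, List.countP_filter]
  congr 1
  apply List.countP_congr
  intro p hp
  have hb : p.2 ∈ banned ↔ k ≤ (P.countP (fun q => q.2 == p.2) : Int) := by
    rw [← PySem.Set.contains_iff banned p.2, hbanned p hp]
    simp [ge_iff_le]
  simp [h2 p.2, Bool.and_comm, hb, ge_iff_le]
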